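-- pv_equiv track=rewrite | github.com/Hsbtqemy/AGRAFES | src/multicorpus_engine/segmentation_quality.py | boundary_positions
-- ===== SOURCE A (Python) =====
-- from typing import Iterable
--
-- def _normalize_sentences(sentences: Iterable[str]) -> tuple[str, ...]:
--     return tuple(part.strip() for part in sentences if part and part.strip())
--
-- def boundary_positions(sentences: Iterable[str]) -> set[int]:
--     """Return sentence boundary positions on a canonical joined string."""
--     normalized = _normalize_sentences(sentences)
--     boundaries: set[int] = set()
--     pos = 0
--     last = len(normalized) - 1
--     for i, sentence in enumerate(normalized):
--         pos += len(sentence)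
--         if i < last:
--             boundaries.add(pos)
--             pos += 1  # canonical single space between sentences
--     return boundaries
-- ===== SOURCE B (Python) =====
-- def boundary_positions(sentences):
--     """Return sentence boundary positions on a canonical joined string."""
--     normalized = [part.strip() for part in sentences if part and part.strip()]
--
--     def rec(parts):
--         # divide and conquer: returns (joined length of parts, boundary set of parts)
--         if not parts:
--             return 0, set()
--         if len(parts) == 1:
--             return len(parts[0]), set()
--         mid = len(parts) // 2
--         llen, lb = rec(parts[:mid])
--         rlen, rb = rec(parts[mid:])
--         # the two halves meet at llen; the right half's boundaries shift past it
--         return llen + 1 + rlen, lb | {llen} | {llen + 1 + b for b in rb}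
--
--     return rec(normalized)[1]
-- ===== Notes on version B (the rewrite author's own statement) =====
-- stated objective: alternative
-- what changed: Replaced A's single forward pass with a mutable running position (pos += len; emit boundary; pos += 1) by a divide-and-conquer recursion that splits the sentence list in half, computes each half's joined length and boundary set, and merges them by shifting the right half's boundaries past the left half, with no running state.
import Mathlib
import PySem

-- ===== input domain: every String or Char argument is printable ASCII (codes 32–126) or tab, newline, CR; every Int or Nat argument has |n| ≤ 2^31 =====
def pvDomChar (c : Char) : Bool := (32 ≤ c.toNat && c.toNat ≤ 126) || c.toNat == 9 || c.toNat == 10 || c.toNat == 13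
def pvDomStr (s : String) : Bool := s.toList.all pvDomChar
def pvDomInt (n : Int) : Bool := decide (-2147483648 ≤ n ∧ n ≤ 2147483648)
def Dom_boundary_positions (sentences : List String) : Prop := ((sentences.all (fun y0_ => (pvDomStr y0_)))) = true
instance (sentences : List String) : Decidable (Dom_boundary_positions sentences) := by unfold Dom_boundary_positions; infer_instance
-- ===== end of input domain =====

-- B replaces A's forward running-position loop by a divide-and-conquer recursion that splits the
-- list in half and merges the halves' boundary sets by shifting; objective: alternative algorithm.

-- ===== PORT A =====
-- _normalize_sentences (identical helper in both sources)
def pvNormalizeSentences (sentences : List String) : List String :=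
  (sentences.filter (fun part => !(part == "") && !(PySem.Str.strip part == ""))).map
    (fun part => PySem.Str.strip part)

def boundary_positions (sentences : List String) : List Int :=
  let normalized := pvNormalizeSentences sentences
  let last : Int := (normalized.length : Int) - 1
  ((PySem.List.enumerate normalized 0).foldl
    (fun (st : Int × PySem.Set Int) (p : Int × String) =>
      let pos := st.1 + PySem.Str.len p.2
      if p.1 < last then (pos + 1, PySem.Set.add st.2 pos) else (pos, st.2))
    ((0 : Int), (PySem.Set.empty : PySem.Set Int))).2

-- ===== PORT B =====
-- rec(parts): if not parts: (0,set()); if len==1: (len(parts[0]),set());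
-- mid = len(parts)//2; combine rec(parts[:mid]) and rec(parts[mid:])
-- (parts[:mid]/parts[mid:] with 0 <= mid <= len are exactly take/drop; len//2 on Nat is Python's //)
def pvRecB : List String → Int × PySem.Set Int
  | [] => ((0 : Int), PySem.Set.empty)
  | [p] => (PySem.Str.len p, PySem.Set.empty)
  | p :: q :: rest =>
      let mid := (p :: q :: rest).length / 2
      let l := pvRecB ((p :: q :: rest).take mid)
      let r := pvRecB ((p :: q :: rest).drop mid)
      (l.1 + 1 + r.1,
        PySem.Set.union (PySem.Set.union l.2 (PySem.Set.ofList [l.1]))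
          (PySem.Set.ofList (r.2.map (fun b => l.1 + 1 + b))))
termination_by parts => parts.length
decreasing_by
  · simp [List.length_take]; omega
  · simp; omega

def boundary_positions_alt (sentences : List String) : List Int :=
  (pvRecB (pvNormalizeSentences sentences)).2

-- ===== PRECONDITION & SPEC =====
def Spec_boundary_positions (sentences : List String) (out : List Int) : Prop := out = boundary_positions_alt sentences
instance (sentences : List String) (out : List Int) : Decidable (Spec_boundary_positions sentences out) := by unfold Spec_boundary_positions; infer_instance

-- ===== CLAIM (what is proved, stated in full; the proofs are below) =====
def Claim_equal_boundary_positions : Prop := ∀ (sentences : List String), Dom_boundary_positions sentences → Spec_boundary_positions sentences (boundary_positions sentences)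

-- ===== LEMMAS AND PROOFS =====

-- common closed form of the boundary list: pvBnds pos ss lists pos + len s₀, … with one gap per space
def pvBnds (pos : Int) : List String → List Int
  | [] => []
  | [_] => []
  | s :: t :: rest => (pos + PySem.Str.len s) :: pvBnds (pos + PySem.Str.len s + 1) (t :: rest)

theorem pvLen_nonneg (s : String) : 0 ≤ PySem.Str.len s := by
  simp [PySem.Str.len_eq]

theorem pvBnds_lb (ss : List String) : ∀ (pos : Int), ∀ x ∈ pvBnds pos ss, pos ≤ x := by
  induction ss with
  | nil => intro pos x hx; simp [pvBnds] at hx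
  | cons s rest ih =>
    intro pos x hx
    cases rest with
    | nil => simp [pvBnds] at hx
    | cons t rest' =>
      simp only [pvBnds, List.mem_cons] at hx
      rcases hx with h | h
      · have := pvLen_nonneg s; omega
      · have := ih (pos + PySem.Str.len s + 1) x h
        have := pvLen_nonneg s; omega

theorem pvBnds_pairwise (ss : List String) : ∀ (pos : Int), (pvBnds pos ss).Pairwise (· < ·) := by
  induction ss with
  | nil => intro pos; simp [pvBnds]
  | cons s rest ih =>
    intro pos
    cases rest with
    | nil => simp [pvBnds]
    | cons t rest' =>
      simp only [pvBnds]
      refine List.pairwise_cons.mpr ⟨?_, ih _⟩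
      intro x hx
      have := pvBnds_lb (t :: rest') (pos + PySem.Str.len s + 1) x hx
      omega

theorem pvBnds_nodup (ss : List String) (pos : Int) : (pvBnds pos ss).Nodup :=
  (pvBnds_pairwise ss pos).imp (fun h => ne_of_lt h)

-- A's loop computes acc ++ pvBnds pos ss when the enumeration indices end exactly at L
theorem pvA_loop (L : Int) (ss : List String) : ∀ (k pos : Int) (acc : List Int),
    k + (ss.length : Int) = L + 1 → (∀ x ∈ acc, x < pos) →
    ((PySem.List.enumerate ss k).foldl
      (fun (st : Int × PySem.Set Int) (p : Int × String) =>
        let pos := st.1 + PySem.Str.len p.2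
        if p.1 < L then (pos + 1, PySem.Set.add st.2 pos) else (pos, st.2))
      (pos, acc)).2 = acc ++ pvBnds pos ss := by
  induction ss with
  | nil => intro k pos acc _ _; simp [PySem.List.enumerate_nil, pvBnds]
  | cons s rest ih =>
    intro k pos acc hk hacc
    rw [PySem.List.enumerate_cons]
    cases rest with
    | nil =>
      have hkL : k = L := by simp at hk; omega
      simp [pvBnds, hkL, PySem.List.enumerate_nil]
    | cons t rest' =>
      have hkL : k < L := by simp at hk; omega
      have hnotmem : (pos + PySem.Str.len s) ∉ acc := by
        intro hmem
        have := hacc _ hmem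
        have := pvLen_nonneg s
        omega
      simp only [List.foldl_cons, if_pos hkL]
      rw [PySem.Set.add_of_not_mem hnotmem]
      rw [ih (k + 1) (pos + PySem.Str.len s + 1) (acc ++ [pos + PySem.Str.len s])
        (by simp at hk ⊢; omega)
        (by intro x hx
            rcases List.mem_append.mp hx with h | h
            · have := hacc _ h; have := pvLen_nonneg s; omega
            · simp [PySem.Str.len_eq] at h ⊢; omega)]
      simp [pvBnds]

theorem pvA_eq (sentences : List String) :
    boundary_positions sentences = pvBnds 0 (pvNormalizeSentences sentences) := by
  unfold boundary_positions
  have := pvA_loop ((pvNormalizeSentences sentences).length - 1) (pvNormalizeSentences sentences)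
    0 0 [] (by omega) (by intro x hx; simp at hx)
  simpa [PySem.Set.empty] using this

-- shifting the starting position shifts every boundary
theorem pvBnds_shift (ss : List String) : ∀ (d : Int),
    pvBnds d ss = (pvBnds 0 ss).map (fun b => d + b) := by
  induction ss with
  | nil => intro d; simp [pvBnds]
  | cons s rest ih =>
    intro d
    cases rest with
    | nil => simp [pvBnds]
    | cons t rest' =>
      simp only [pvBnds, List.map_cons]
      rw [ih (d + PySem.Str.len s + 1), ih (0 + PySem.Str.len s + 1), List.map_map]
      simp only [List.cons.injEq]
      refine ⟨by ring, ?_⟩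
      apply List.map_congr_left
      intro b _
      simp [Function.comp]
      ring

-- length of the canonically joined string " ".join(ss)
def pvJLen : List String → Int
  | [] => 0
  | s :: rest => PySem.Str.len s + (rest.map (fun t => PySem.Str.len t + 1)).sum

theorem pvJLen_nonneg (ss : List String) : 0 ≤ pvJLen ss := by
  cases ss with
  | nil => simp [pvJLen]
  | cons s rest =>
    have h1 := pvLen_nonneg s
    have h2 : 0 ≤ (rest.map (fun t => PySem.Str.len t + 1)).sum := by
      apply List.sum_nonneg
      intro x hx
      rcases List.mem_map.mp hx with ⟨t, _, rfl⟩
      have := pvLen_nonneg t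
      omega
    simp only [pvJLen]
    omega

theorem pvJLen_append (l r : List String) (hl : l ≠ []) (hr : r ≠ []) :
    pvJLen (l ++ r) = pvJLen l + 1 + pvJLen r := by
  cases l with
  | nil => exact absurd rfl hl
  | cons s l' =>
    cases r with
    | nil => exact absurd rfl hr
    | cons t rest =>
      simp only [List.cons_append, pvJLen, List.map_append, List.sum_append,
        List.map_cons, List.sum_cons]
      ring

theorem pvBnds_ub (ss : List String) : ∀ (pos : Int), ∀ x ∈ pvBnds pos ss, x < pos + pvJLen ss := by
  induction ss with
  | nil => intro pos x hx; simp [pvBnds] at hx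
  | cons s rest ih =>
    intro pos x hx
    cases rest with
    | nil => simp [pvBnds] at hx
    | cons t rest' =>
      have hcons : pvJLen (s :: t :: rest') = PySem.Str.len s + 1 + pvJLen (t :: rest') :=
        pvJLen_append [s] (t :: rest') (by simp) (by simp)
      simp only [pvBnds, List.mem_cons] at hx
      rcases hx with h | h
      · have := pvJLen_nonneg (t :: rest')
        rw [hcons]
        omega
      · have := ih (pos + PySem.Str.len s + 1) x h
        rw [hcons]
        omega

theorem pvBnds_append (l r : List String) (hl : l ≠ []) (hr : r ≠ []) : ∀ (pos : Int),
    pvBnds pos (l ++ r) = pvBnds pos l ++ (pos + pvJLen l) :: pvBnds (pos + pvJLen l + 1) r := by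
  induction l with
  | nil => exact absurd rfl hl
  | cons s l' ih =>
    intro pos
    cases l' with
    | nil =>
      cases r with
      | nil => exact absurd rfl hr
      | cons t rest => simp [pvBnds, pvJLen]
    | cons u l'' =>
      have h2 : pvJLen (s :: u :: l'') = PySem.Str.len s + 1 + pvJLen (u :: l'') :=
        pvJLen_append [s] (u :: l'') (by simp) (by simp)
      rcases List.exists_cons_of_ne_nil (show (u :: l'') ++ r ≠ [] by simp) with ⟨v, tl, hv⟩
      have lhs : pvBnds pos ((s :: u :: l'') ++ r)
          = (pos + PySem.Str.len s) :: pvBnds (pos + PySem.Str.len s + 1) ((u :: l'') ++ r) := by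
        rw [List.cons_append, hv]
        simp [pvBnds, ← hv]
      rw [lhs, ih (by simp) (pos + PySem.Str.len s + 1)]
      have e1 : pos + PySem.Str.len s + 1 + pvJLen (u :: l'') = pos + pvJLen (s :: u :: l'') := by
        rw [h2]; ring
      rw [e1]
      simp [pvBnds]

-- appending fresh nodup elements to a Set is plain append
theorem pvUpdate_disjoint {t : List Int} : ∀ (s : List Int), t.Nodup → (∀ x ∈ t, x ∉ s) →
    PySem.Set.update s t = s ++ t := by
  induction t with
  | nil => intro s _ _; simp [PySem.Set.update]
  | cons x rest ih =>
    intro s hnd hdisj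
    have hx : x ∉ s := hdisj x (List.mem_cons_self)
    have : PySem.Set.update s (x :: rest) = PySem.Set.update (PySem.Set.add s x) rest := rfl
    rw [this, PySem.Set.add_of_not_mem hx,
        ih (s ++ [x]) (List.nodup_cons.mp hnd).2
          (by intro y hy
              simp only [List.mem_append, List.mem_singleton]
              push Not
              exact ⟨fun h => hdisj y (List.mem_cons_of_mem _ hy) h,
                     fun h => (List.nodup_cons.mp hnd).1 (h ▸ hy)⟩)]
    simp

-- Set.union s t is definitionally Set.update s t
theorem pvUnion_disjoint (s t : List Int) (h1 : t.Nodup) (h2 : ∀ x ∈ t, x ∉ s) :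
    PySem.Set.union s t = s ++ t :=
  pvUpdate_disjoint s h1 h2

theorem pvRecB_eq (parts : List String) : pvRecB parts = (pvJLen parts, pvBnds 0 parts) := by
  induction parts using pvRecB.induct with
  | case1 => simp [pvRecB, pvJLen, pvBnds, PySem.Set.empty]
  | case2 p => simp [pvRecB, pvJLen, pvBnds, PySem.Set.empty]
  | case3 p q rest mid ihl ihr =>
    have hm : mid = (p :: q :: rest).length / 2 := rfl
    rw [hm] at ihl ihr
    simp only [pvRecB]
    rw [ihl, ihr]
    set L := List.take ((p :: q :: rest).length / 2) (p :: q :: rest) with hL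
    set R := List.drop ((p :: q :: rest).length / 2) (p :: q :: rest) with hR
    have htl : L ≠ [] := by
      have hlen : L.length = (p :: q :: rest).length / 2 := by
        rw [hL, List.length_take]; simp; omega
      intro h; rw [h] at hlen; simp at hlen; omega
    have hdr : R ≠ [] := by
      have hlen : R.length = (p :: q :: rest).length - (p :: q :: rest).length / 2 := by
        rw [hR, List.length_drop]
      intro h; rw [h] at hlen; simp at hlen; omega
    have hsplit : L ++ R = p :: q :: rest := List.take_append_drop _ _
    simp only [Prod.mk.injEq]
    refine ⟨?_, ?_⟩
    · rw [← pvJLen_append L R htl hdr, hsplit]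
    · have hub : ∀ x ∈ pvBnds 0 L, x < pvJLen L := by
        intro x hx; have := pvBnds_ub L 0 x hx; omega
      have hofl1 : PySem.Set.ofList [pvJLen L] = [pvJLen L] :=
        PySem.Set.ofList_eq_self_of_nodup _ (by simp)
      have hu1 : PySem.Set.union (pvBnds 0 L) [pvJLen L] = pvBnds 0 L ++ [pvJLen L] := by
        apply pvUnion_disjoint _ _ (by simp)
        intro x hx
        simp only [List.mem_singleton] at hx
        subst hx
        intro hmem
        exact absurd (hub _ hmem) (by omega)
      have hndsh : ((pvBnds 0 R).map (fun b => pvJLen L + 1 + b)).Nodup :=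
        (pvBnds_nodup R 0).map (fun a b h => by omega)
      have hofl2 : PySem.Set.ofList ((pvBnds 0 R).map (fun b => pvJLen L + 1 + b))
          = (pvBnds 0 R).map (fun b => pvJLen L + 1 + b) :=
        PySem.Set.ofList_eq_self_of_nodup _ hndsh
      have hu2 : PySem.Set.union (pvBnds 0 L ++ [pvJLen L])
            ((pvBnds 0 R).map (fun b => pvJLen L + 1 + b))
          = (pvBnds 0 L ++ [pvJLen L]) ++ (pvBnds 0 R).map (fun b => pvJLen L + 1 + b) := by
        apply pvUnion_disjoint _ _ hndsh
        intro x hx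
        rcases List.mem_map.mp hx with ⟨b, hb, rfl⟩
        have hbnn := pvBnds_lb R 0 b hb
        intro hmem
        rcases List.mem_append.mp hmem with h | h
        · have := hub _ h; omega
        · simp only [List.mem_singleton] at h; omega
      rw [hofl1, hofl2, hu1, hu2]
      have happ := pvBnds_append L R htl hdr 0
      rw [hsplit] at happ
      rw [happ, pvBnds_shift R (0 + pvJLen L + 1)]
      simp only [List.append_assoc, List.singleton_append]
      congr 2
      · omega
      · apply List.map_congr_left
        intro b _
        ring

-- ===== VERDICT (by name: the statement is the Claim_ definition above) =====
theorem boundary_positions_spec : Claim_equal_boundary_positions := by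
  intro sentences _
  unfold Spec_boundary_positions boundary_positions_alt
  rw [pvA_eq, pvRecB_eq]
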